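-- pv_equiv track=rewrite | github.com/cassiobarth/analise-capital-cognitivo-brasil | src/cog/01_process_saeb_historical.py | find_columns_heuristic
-- ===== SOURCE A (Python) =====
-- def find_columns_heuristic(all_cols, grade_tag):
--     upper_cols = [c.upper() for c in all_cols]
--     lp_candidates = []
--     mt_candidates = []
--
--     for original, upper in zip(all_cols, upper_cols):
--         if 'MEDIA' in upper or 'PROFICIENCIA' in upper:
--             if grade_tag in upper or (grade_tag == '3EM' and '_EM_' in upper):
--                 if 'LP' in upper or 'LINGUA' in upper:
--                     lp_candidates.append(original)
--                 elif 'MT' in upper or 'MAT' in upper: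
--                     mt_candidates.append(original)
--
--     lp = min(lp_candidates, key=len) if lp_candidates else None
--     mt = min(mt_candidates, key=len) if mt_candidates else None
--     return lp, mt
-- ===== SOURCE B (Python) =====
-- def find_columns_heuristic(all_cols, grade_tag):
--     # Sort-then-scan: stable-sort the columns by length once, then the FIRST
--     # qualifying LP (resp. MT) column in that order is exactly min(key=len)
--     # with first-of-ties semantics; no candidate lists, no running minimum.
--     def qualifies(u):
--         return (('MEDIA' in u or 'PROFICIENCIA' in u)
--                 and (grade_tag in u or (grade_tag == '3EM' and '_EM_' in u)))
--
--     by_len = sorted(all_cols, key=len)  # stable: ties keep original order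
--     lp = next((c for c in by_len
--                if qualifies(c.upper()) and ('LP' in c.upper() or 'LINGUA' in c.upper())),
--               None)
--     mt = next((c for c in by_len
--                if qualifies(c.upper()) and not ('LP' in c.upper() or 'LINGUA' in c.upper())
--                and ('MT' in c.upper() or 'MAT' in c.upper())),
--               None)
--     return lp, mt
-- ===== Notes on version B (the rewrite author's own statement) =====
-- stated objective: alternative
-- what changed: Replaces collect-candidates-then-min(key=len) with sort-then-scan: stable-sort the columns by length once and take the first qualifying LP (resp. MT) column in that order, which equals min(key=len) with first-of-ties semantics by stability of the sort.
import Mathlib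
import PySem

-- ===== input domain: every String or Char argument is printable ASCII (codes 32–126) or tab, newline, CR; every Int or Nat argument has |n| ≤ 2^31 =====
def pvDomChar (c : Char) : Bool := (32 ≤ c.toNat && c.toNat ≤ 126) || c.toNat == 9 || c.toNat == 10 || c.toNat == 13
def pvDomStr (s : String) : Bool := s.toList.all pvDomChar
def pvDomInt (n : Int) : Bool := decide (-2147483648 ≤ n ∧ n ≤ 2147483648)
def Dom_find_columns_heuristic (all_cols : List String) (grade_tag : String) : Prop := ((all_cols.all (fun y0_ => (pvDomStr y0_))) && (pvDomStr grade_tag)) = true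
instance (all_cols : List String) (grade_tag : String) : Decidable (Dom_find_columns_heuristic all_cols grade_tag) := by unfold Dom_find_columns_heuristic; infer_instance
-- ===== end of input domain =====

-- B replaces A's collect-candidates-then-min(key=len) with sort-then-scan: stable-sort by
-- length once, then take the first qualifying LP/MT column; objective: alternative.

-- ===== PORT A =====
-- loop body of A (the step of its for-loop over zip(all_cols, upper_cols))
def pvStepA (grade_tag : String) (acc : List String × List String) (p : String × String) : List String × List String :=
  if PySem.Str.isIn "MEDIA" p.2 || PySem.Str.isIn "PROFICIENCIA" p.2 then
    if PySem.Str.isIn grade_tag p.2 || (grade_tag == "3EM" && PySem.Str.isIn "_EM_" p.2) then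
      if PySem.Str.isIn "LP" p.2 || PySem.Str.isIn "LINGUA" p.2 then
        (acc.1 ++ [p.1], acc.2)
      else if PySem.Str.isIn "MT" p.2 || PySem.Str.isIn "MAT" p.2 then
        (acc.1, acc.2 ++ [p.1])
      else acc
    else acc
  else acc

def find_columns_heuristic (all_cols : List String) (grade_tag : String) : Option String × Option String :=
  let upper_cols := all_cols.map PySem.Str.upper
  let acc := (all_cols.zip upper_cols).foldl (pvStepA grade_tag) ([], [])
  let lp := if acc.1 ≠ [] then PySem.List.min? acc.1 (fun s => PySem.Str.len s) else none
  let mt := if acc.2 ≠ [] then PySem.List.min? acc.2 (fun s => PySem.Str.len s) else none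
  (lp, mt)

-- ===== PORT B =====
-- 'qualifies(u)' of Source B
def pvQualifies (grade_tag : String) (u : String) : Bool :=
  (PySem.Str.isIn "MEDIA" u || PySem.Str.isIn "PROFICIENCIA" u) &&
  (PySem.Str.isIn grade_tag u || (grade_tag == "3EM" && PySem.Str.isIn "_EM_" u))

-- the two generator filters of Source B ('next((c for c in by_len if …), None)' = List.find?)
def pvIsLPCol (grade_tag : String) (c : String) : Bool :=
  pvQualifies grade_tag (PySem.Str.upper c) &&
  (PySem.Str.isIn "LP" (PySem.Str.upper c) || PySem.Str.isIn "LINGUA" (PySem.Str.upper c))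

def pvIsMTCol (grade_tag : String) (c : String) : Bool :=
  pvQualifies grade_tag (PySem.Str.upper c) &&
  !(PySem.Str.isIn "LP" (PySem.Str.upper c) || PySem.Str.isIn "LINGUA" (PySem.Str.upper c)) &&
  (PySem.Str.isIn "MT" (PySem.Str.upper c) || PySem.Str.isIn "MAT" (PySem.Str.upper c))

def find_columns_heuristic_alt (all_cols : List String) (grade_tag : String) : Option String × Option String :=
  let by_len := PySem.List.sorted all_cols (fun s => PySem.Str.len s)   -- stable sort by length
  (by_len.find? (pvIsLPCol grade_tag), by_len.find? (pvIsMTCol grade_tag))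

-- ===== PRECONDITION & SPEC =====
def Spec_find_columns_heuristic (all_cols : List String) (grade_tag : String) (out : Option String × Option String) : Prop := out = find_columns_heuristic_alt all_cols grade_tag
instance (all_cols : List String) (grade_tag : String) (out : Option String × Option String) : Decidable (Spec_find_columns_heuristic all_cols grade_tag out) := by unfold Spec_find_columns_heuristic; infer_instance

-- ===== CLAIM (what is proved, stated in full; the proofs are below) =====
def Claim_equal_find_columns_heuristic : Prop := ∀ (all_cols : List String) (grade_tag : String), Dom_find_columns_heuristic all_cols grade_tag → Spec_find_columns_heuristic all_cols grade_tag (find_columns_heuristic all_cols grade_tag)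

-- ===== LEMMAS AND PROOFS =====

-- proof-only helper: the running min(key=len) step with strict '<' (first-of-ties)
def pvUpdateBest (best : Option String) (x : String) : Option String :=
  match best with
  | none => some x
  | some b => if PySem.Str.len x < PySem.Str.len b then some x else some b

theorem pv_min?_eq_foldl (l : List String) :
    PySem.List.min? l (fun s => PySem.Str.len s) = List.foldl pvUpdateBest none l := by
  unfold PySem.List.min?
  congr 1
  funext a y
  cases a <;> rfl

theorem pv_min?_nonempty_if (l : List String) :
    (if l ≠ [] then PySem.List.min? l (fun s => PySem.Str.len s) else none)
      = PySem.List.min? l (fun s => PySem.Str.len s) := by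
  cases l <;> simp [PySem.List.min?]

-- A's foldl over zip builds exactly the two filtered candidate lists
theorem pv_cands (grade_tag : String) (cols : List String) : ∀ (l m : List String),
    (cols.zip (cols.map PySem.Str.upper)).foldl (pvStepA grade_tag) (l, m)
      = (l ++ cols.filter (pvIsLPCol grade_tag), m ++ cols.filter (pvIsMTCol grade_tag)) := by
  induction cols with
  | nil => intro l m; simp
  | cons x cs ih =>
    intro l m
    have hstep : pvStepA grade_tag (l, m) (x, PySem.Str.upper x)
        = (l ++ if pvIsLPCol grade_tag x then [x] else [],
           m ++ if pvIsMTCol grade_tag x then [x] else []) := by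
      unfold pvStepA pvIsLPCol pvIsMTCol pvQualifies
      cases h1 : (PySem.Str.isIn "MEDIA" (PySem.Str.upper x) || PySem.Str.isIn "PROFICIENCIA" (PySem.Str.upper x)) <;>
      cases h2 : (PySem.Str.isIn grade_tag (PySem.Str.upper x) || (grade_tag == "3EM" && PySem.Str.isIn "_EM_" (PySem.Str.upper x))) <;>
      cases h3 : (PySem.Str.isIn "LP" (PySem.Str.upper x) || PySem.Str.isIn "LINGUA" (PySem.Str.upper x)) <;>
      cases h4 : (PySem.Str.isIn "MT" (PySem.Str.upper x) || PySem.Str.isIn "MAT" (PySem.Str.upper x)) <;>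
      simp_all
    rw [List.map_cons, List.zip_cons_cons, List.foldl_cons, hstep, ih,
        List.filter_cons, List.filter_cons]
    split_ifs <;> simp

-- inserting into a length-sorted list commutes with find? up to one pvUpdateBest step
theorem pv_find?_insertBy (p : String → Bool) (x : String) : ∀ (ys : List String),
    ys.Pairwise (fun a b => PySem.Str.len a ≤ PySem.Str.len b) →
    List.find? p (PySem.List.insertBy (fun a b => decide (PySem.Str.len a < PySem.Str.len b)) x ys)
      = if p x then pvUpdateBest (List.find? p ys) x else List.find? p ys := by
  intro ys
  induction ys with
  | nil =>
    intro _
    cases hpx : p x <;> simp [PySem.List.insertBy, hpx, pvUpdateBest]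
  | cons y ys ih =>
    intro hpw
    have hy : ∀ z ∈ ys, PySem.Str.len y ≤ PySem.Str.len z := (List.pairwise_cons.mp hpw).1
    have hpw' := (List.pairwise_cons.mp hpw).2
    unfold PySem.List.insertBy
    by_cases hlt : PySem.Str.len x < PySem.Str.len y
    · rw [if_pos (by simpa using hlt)]
      cases hpx : p x
      · rw [List.find?_cons_of_neg (by simp [hpx]), if_neg (by simp)]
      · rw [List.find?_cons_of_pos hpx, if_pos rfl]
        cases hfy : List.find? p (y :: ys) with
        | none => rfl
        | some m =>
          have hm : m ∈ y :: ys := List.mem_of_find?_eq_some hfy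
          have hym : PySem.Str.len y ≤ PySem.Str.len m := by
            rcases List.mem_cons.mp hm with h | h
            · simp [h]
            · exact hy m h
          have hxm : PySem.Str.len x < PySem.Str.len m := lt_of_lt_of_le hlt hym
          exact (if_pos hxm).symm
    · rw [if_neg (by simpa using hlt)]
      cases hpy : p y
      · rw [List.find?_cons_of_neg (by simp [hpy]), List.find?_cons_of_neg (by simp [hpy]),
            ih hpw']
      · rw [List.find?_cons_of_pos hpy, List.find?_cons_of_pos hpy]
        cases hpx : p x
        · rw [if_neg (by simp)]
        · rw [if_pos rfl]
          exact (if_neg hlt).symm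

-- first match in the stable length-sort = running min(key=len) over the filtered list
theorem pv_find?_sorted (p : String → Bool) (xs : List String) :
    List.find? p (PySem.List.sorted xs (fun s => PySem.Str.len s))
      = List.foldl pvUpdateBest none (xs.filter p) := by
  induction xs using List.reverseRecOn with
  | nil => rfl
  | append_singleton xs x ih =>
    have hsor : PySem.List.sorted (xs ++ [x]) (fun s => PySem.Str.len s)
        = PySem.List.insertBy (fun a b => decide (PySem.Str.len a < PySem.Str.len b)) x
            (PySem.List.sorted xs (fun s => PySem.Str.len s)) := by
      rw [PySem.List.sorted_eq_foldl_insertBy, PySem.List.sorted_eq_foldl_insertBy, List.foldl_append]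
      rfl
    rw [hsor, pv_find?_insertBy p x _ (PySem.List.sorted_pairwise xs _), ih,
        List.filter_append, List.foldl_append]
    cases hpx : p x <;> simp [hpx, List.filter]

-- ===== VERDICT (by name: the statement is the Claim_ definition above) =====
theorem find_columns_heuristic_spec : Claim_equal_find_columns_heuristic := by
  intro all_cols grade_tag _
  unfold Spec_find_columns_heuristic find_columns_heuristic find_columns_heuristic_alt
  simp only [pv_cands grade_tag all_cols [] [], List.nil_append]
  rw [pv_min?_nonempty_if, pv_min?_nonempty_if]
  simp only [pv_min?_eq_foldl, ← pv_find?_sorted]
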